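-- pv_equiv track=rewrite | github.com/Ryeoly/Algorithm_study | BFS, DFS/baekjoon_2468.py | execut
-- ===== SOURCE A (Python) =====
-- from collections import deque
-- from copy import deepcopy
--
-- def bfs(arr, number, n, col, row):
--     dx = [0, 0, 1, -1]
--     dy = [-1, 1, 0, 0]
--     que = deque()
--     que.append((col, row))
--     arr[col][row] = number
--
--     while que:
--         x, y = que.popleft()
--         for i in range(4):
--             t_x = x + dx[i]
--             t_y = y + dy[i]
--             if 0 <= t_x < n and 0 <= t_y < n and arr[t_x][t_y] > number:
--                 que.append((t_x, t_y))
--                 arr[t_x][t_y] = number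
--     return arr
--
-- def execut(arr, number, n):
--     temp_arr = deepcopy(arr)
--     count = 0
--     for i in range(n):
--         for j in range(n):
--             if temp_arr[i][j] > number:
--                 temp_arr = bfs(temp_arr, number, n, i, j)
--                 count += 1
--     return count
-- ===== SOURCE B (Python) =====
-- def execut(arr, number, n):
--     label = {}
--     for i in range(n):
--         for j in range(n):
--             if arr[i][j] > number:
--                 label[(i, j)] = (i, j)
--     members = {}
--     for c in label:
--         members[c] = [c]
--     for i in range(n):
--         for j in range(n):
--             if (i, j) in label:
--                 for t in ((i, j + 1), (i + 1, j)):
--                     if t in label: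
--                         a, b = label[(i, j)], label[t]
--                         if a != b:
--                             if len(members[a]) < len(members[b]):
--                                 a, b = b, a
--                             for d in members[b]:
--                                 label[d] = a
--                             members[a].extend(members.pop(b))
--     return len(set(label.values()))
-- ===== Notes on version B (the rewrite author's own statement) =====
-- stated objective: alternative
-- what changed: A counts regions by BFS flood fill over a deep-copied grid (queue, overwrite cells with the threshold); B never searches the grid: it builds a label dict mapping each qualifying cell to a component label, merges labels across right/down neighbour pairs with small-to-large relabeling (a members dict), and returns the number of distinct labels.
import Mathlib
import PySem

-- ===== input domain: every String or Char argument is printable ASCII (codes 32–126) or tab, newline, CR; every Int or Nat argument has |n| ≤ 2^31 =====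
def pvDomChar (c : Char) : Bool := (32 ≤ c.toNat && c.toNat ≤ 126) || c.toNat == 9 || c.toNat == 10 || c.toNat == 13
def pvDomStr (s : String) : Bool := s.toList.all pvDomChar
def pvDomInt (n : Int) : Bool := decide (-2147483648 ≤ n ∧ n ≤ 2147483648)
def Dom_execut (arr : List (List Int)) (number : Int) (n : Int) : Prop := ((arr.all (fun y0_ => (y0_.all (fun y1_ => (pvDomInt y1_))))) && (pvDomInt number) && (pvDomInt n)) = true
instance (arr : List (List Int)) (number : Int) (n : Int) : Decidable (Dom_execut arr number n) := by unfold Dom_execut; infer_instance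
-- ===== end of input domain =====

-- B replaces A's deepcopy-and-mutate BFS flood fill by connected-component labeling: a label
-- dict over the qualifying cells, merged across right/down neighbour pairs with small-to-large
-- relabeling, returning the number of distinct labels (objective: alternative; A only mutates
-- a local deepcopy, so neither version mutates the caller's arr).

-- ===== PORT A =====
-- arr[i][j] (both reads non-negative and in range on every input A accepts; Pre_ excludes the IndexError cases)
def pvGet2 (g : List (List Int)) (i j : Int) : Option Int :=
  (PySem.List.pyGet? g i).bind (fun row => PySem.List.pyGet? row j)

-- 'arr[i][j] > number' as a total guard: none (Python IndexError, excluded by Pre_) counts as false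
def pvGt (o : Option Int) (number : Int) : Bool :=
  match o with
  | some v => decide (number < v)
  | none => false

-- 'g[i][j] = v'; exact for the non-negative in-range indices A uses (guards 0 ≤ t < n precede every write)
def pvSet2 (g : List (List Int)) (i j : Int) (v : Int) : List (List Int) :=
  g.modify i.toNat (fun row => row.set j.toNat v)

-- number of grid entries still > number (termination measure of the while-loop)
def pvExceed (number : Int) (g : List (List Int)) : Nat :=
  (g.map (fun row => row.countP (fun v => decide (number < v)))).sum

-- dx = [0,0,1,-1], dy = [-1,1,0,0], zipped: the loop 'for i in range(4)' indexes both in lockstep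
def pvDirs : List (Int × Int) := [(0, -1), (0, 1), (1, 0), (-1, 0)]

-- body of the 'for i in range(4)' loop: state = (grid, cells appended to the queue this iteration)
def bfsStep (number n x y : Int) (st : List (List Int) × List (Int × Int)) (d : Int × Int) :
    List (List Int) × List (Int × Int) :=
  -- t_x = x + dx[i], t_y = y + dy[i] inlined
  if 0 ≤ x + d.1 ∧ x + d.1 < n ∧ 0 ≤ y + d.2 ∧ y + d.2 < n ∧ pvGt (pvGet2 st.1 (x + d.1) (y + d.2)) number = true then
    (pvSet2 st.1 (x + d.1) (y + d.2) number, st.2 ++ [(x + d.1, y + d.2)])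
  else st

-- the while-loop of bfs: pops the queue front, marks-and-enqueues qualifying neighbours.
-- fuel is only a structural-termination guard; bfs supplies 2*pvExceed+1, which the proofs
-- below show never runs out (each iteration strictly decreases 2*pvExceed g + que.length)
def bfsLoop (number n : Int) : Nat → List (List Int) → List (Int × Int) → List (List Int)
  | _, g, [] => g
  | 0, g, _ :: _ => g
  | fuel + 1, g, (x, y) :: rest =>
      let r := pvDirs.foldl (bfsStep number n x y) (g, ([] : List (Int × Int)))
      bfsLoop number n fuel r.1 (rest ++ r.2)

def bfs (arr : List (List Int)) (number n col row : Int) : List (List Int) :=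
  bfsLoop number n (2 * pvExceed number (pvSet2 arr col row number) + 1)
    (pvSet2 arr col row number) [(col, row)]

def execut (arr : List (List Int)) (number : Int) (n : Int) : Int :=
  ((PySem.List.pyRange 0 n 1).foldl (fun (st : List (List Int) × Int) i =>
      (PySem.List.pyRange 0 n 1).foldl (fun (st : List (List Int) × Int) j =>
        if pvGt (pvGet2 st.1 i j) number = true then (bfs st.1 number n i j, st.2 + 1) else st) st)
    (arr, (0 : Int))).2

-- ===== PORT B =====
-- first double loop: label[(i,j)] = (i,j) for every qualifying cell, in scan order
def pvBuild (arr : List (List Int)) (number n : Int) : PySem.Dict (Int × Int) (Int × Int) :=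
  (PySem.List.pyRange 0 n 1).foldl (fun d i =>
    (PySem.List.pyRange 0 n 1).foldl (fun d j =>
      if pvGt (pvGet2 arr i j) number = true then d.insert (i, j) (i, j) else d) d)
    PySem.Dict.empty

-- 'members = {}; for c in label: members[c] = [c]'
def pvMembers0 (lab : PySem.Dict (Int × Int) (Int × Int)) :
    PySem.Dict (Int × Int) (List (Int × Int)) :=
  lab.keys.foldl (fun m c => m.insert c [c]) PySem.Dict.empty

-- body of 'for t in ((i,j+1),(i+1,j)): …' — merge the labels of c and t when t also qualifies.
-- label[c], label[t], members[a], members[b] are all present whenever Python reads them (proved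
-- by the invariants below), so the getD defaults are never used; members[a].extend(members.pop(b))
-- is ported as modify-then-erase, equal because a ≠ b holds on that branch.
def pvMerge (st : PySem.Dict (Int × Int) (Int × Int) × PySem.Dict (Int × Int) (List (Int × Int)))
    (c t : Int × Int) :
    PySem.Dict (Int × Int) (Int × Int) × PySem.Dict (Int × Int) (List (Int × Int)) :=
  if st.1.contains t then
    let a := st.1.getD c c
    let b := st.1.getD t t
    if a ≠ b then
      -- 'if len(members[a]) < len(members[b]): a, b = b, a'
      let p := if (st.2.getD a []).length < (st.2.getD b []).length then (b, a) else (a, b)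
      -- 'for d in members[b]: label[d] = a'
      let lab' := (st.2.getD p.2 []).foldl (fun L d => L.insert d p.1) st.1
      -- 'members[a].extend(members.pop(b))'
      let mem' := (st.2.modify p.1 [] (fun L => L ++ st.2.getD p.2 [])).erase p.2
      (lab', mem')
    else st
  else st

def execut_alt (arr : List (List Int)) (number : Int) (n : Int) : Int :=
  let lab0 := pvBuild arr number n
  let st := (PySem.List.pyRange 0 n 1).foldl
    (fun (st : PySem.Dict (Int × Int) (Int × Int) × PySem.Dict (Int × Int) (List (Int × Int))) i =>
      (PySem.List.pyRange 0 n 1).foldl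
        (fun (st : PySem.Dict (Int × Int) (Int × Int) × PySem.Dict (Int × Int) (List (Int × Int))) j =>
          if st.1.contains (i, j) then
            [(i, j + 1), (i + 1, j)].foldl (fun st t => pvMerge st (i, j) t) st
          else st) st)
    (lab0, pvMembers0 lab0)
  ((PySem.Set.ofList st.1.values).length : Int)

-- ===== PRECONDITION & SPEC =====
-- Pre_ excludes exactly the inputs where Python A raises IndexError: some i, j ∈ [0, n) with
-- arr[i] or arr[i][j] missing (B's first pass reads the same cells and raises there too).
def Pre_execut (arr : List (List Int)) (number : Int) (n : Int) : Prop :=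
  n ≤ (arr.length : Int) ∧ ∀ row ∈ arr.take n.toNat, n ≤ (row.length : Int)
instance (arr : List (List Int)) (number : Int) (n : Int) : Decidable (Pre_execut arr number n) := by
  unfold Pre_execut; infer_instance

def pvWitness_execut : List (List Int) × Int × Int := ([[2, 1], [1, 2]], 1, 2)

def Spec_execut (arr : List (List Int)) (number : Int) (n : Int) (out : Int) : Prop := out = execut_alt arr number n
instance (arr : List (List Int)) (number : Int) (n : Int) (out : Int) : Decidable (Spec_execut arr number n out) := by unfold Spec_execut; infer_instance

-- ===== CLAIM (what is proved, stated in full; the proofs are below) =====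
def Claim_equal_execut : Prop := ∀ (arr : List (List Int)) (number : Int) (n : Int), Dom_execut arr number n → Pre_execut arr number n → Spec_execut arr number n (execut arr number n)

-- ===== LEMMAS AND PROOFS =====
-- the window [0,n) × [0,n) of cells both programs look at
def pvWin (n : Int) (c : Int × Int) : Prop := 0 ≤ c.1 ∧ c.1 < n ∧ 0 ≤ c.2 ∧ c.2 < n

-- qualifying cell: in the window and strictly above the threshold in the ORIGINAL grid
def pvQ (arr : List (List Int)) (number n : Int) (c : Int × Int) : Prop :=
  pvWin n c ∧ pvGt (pvGet2 arr c.1 c.2) number = true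

def pvNear (c d : Int × Int) : Prop :=
  d = (c.1, c.2 - 1) ∨ d = (c.1, c.2 + 1) ∨ d = (c.1 + 1, c.2) ∨ d = (c.1 - 1, c.2)

def pvStep (arr : List (List Int)) (number n : Int) (c d : Int × Int) : Prop :=
  pvQ arr number n d ∧ pvNear c d

def pvReach (arr : List (List Int)) (number n : Int) (c d : Int × Int) : Prop :=
  Relation.ReflTransGen (pvStep arr number n) c d

-- A's working grid g is the original arr with exactly the cells of M overwritten by number
def pvRep (arr : List (List Int)) (number n : Int) (g : List (List Int))
    (M : (Int × Int) → Prop) : Prop :=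
  (∀ c, M c → pvGet2 g c.1 c.2 = some number) ∧
  (∀ c, pvWin n c → ¬ M c → pvGet2 g c.1 c.2 = pvGet2 arr c.1 c.2)

theorem pvRep_congr (arr : List (List Int)) (number n : Int) (g : List (List Int))
    (M M' : (Int × Int) → Prop) (h : ∀ c, M c ↔ M' c) :
    pvRep arr number n g M → pvRep arr number n g M' := by
  intro ⟨h1, h2⟩
  exact ⟨fun c hc => h1 c ((h c).2 hc), fun c hw hc => h2 c hw (fun hm => hc ((h c).1 hm))⟩

theorem pvGet2_eq_some_iff (g : List (List Int)) (i j v : Int) (hi : 0 ≤ i) (hj : 0 ≤ j) :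
    pvGet2 g i j = some v ↔ ∃ row, g[i.toNat]? = some row ∧ row[j.toNat]? = some v := by
  unfold pvGet2
  rw [PySem.List.pyGet?_of_nonneg g hi]
  simp only [Option.bind_eq_some_iff]
  constructor
  · rintro ⟨row, h1, h2⟩
    exact ⟨row, h1, by rwa [PySem.List.pyGet?_of_nonneg row hj] at h2⟩
  · rintro ⟨row, h1, h2⟩
    exact ⟨row, h1, by rwa [PySem.List.pyGet?_of_nonneg row hj]⟩

theorem pvGet2_pvSet2_self (g : List (List Int)) (i j v w : Int)
    (h : pvGet2 g i j = some w) (hi : 0 ≤ i) (hj : 0 ≤ j) :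
    pvGet2 (pvSet2 g i j v) i j = some v := by
  obtain ⟨row, hrow, hv⟩ := (pvGet2_eq_some_iff g i j w hi hj).mp h
  have hjlt : j.toNat < row.length := by
    by_contra hc
    rw [List.getElem?_eq_none (by omega)] at hv
    simp at hv
  apply (pvGet2_eq_some_iff _ i j v hi hj).mpr
  refine ⟨row.set j.toNat v, ?_, ?_⟩
  · unfold pvSet2
    rw [List.getElem?_modify]
    simp [hrow]
  · rw [List.getElem?_set]
    simp [hjlt]

theorem pvGet2_pvSet2_ne (g : List (List Int)) (i j v a b : Int)
    (hi : 0 ≤ i) (hj : 0 ≤ j) (ha : 0 ≤ a) (hb : 0 ≤ b) (hne : (a, b) ≠ (i, j)) :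
    pvGet2 (pvSet2 g i j v) a b = pvGet2 g a b := by
  unfold pvGet2 pvSet2
  rw [PySem.List.pyGet?_of_nonneg (g.modify i.toNat (fun row => row.set j.toNat v)) ha,
      PySem.List.pyGet?_of_nonneg g ha, List.getElem?_modify]
  by_cases hia : i.toNat = a.toNat
  · have haeq : a = i := by omega
    have hbne : b ≠ j := by
      rintro rfl
      exact hne (by rw [haeq])
    cases hg : g[a.toNat]? with
    | none => simp
    | some row =>
        have hred : (((fun a => a.set j.toNat v) <$> some row).bind fun a => PySem.List.pyGet? a b) =
            PySem.List.pyGet? (row.set j.toNat v) b := rfl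
        have hred2 : ((some row).bind fun a => PySem.List.pyGet? a b) = PySem.List.pyGet? row b := rfl
        simp only [hia, if_true]
        rw [hred, hred2, PySem.List.pyGet?_of_nonneg (row.set j.toNat v) hb,
            PySem.List.pyGet?_of_nonneg row hb, List.getElem?_set]
        have hnb : ¬ j.toNat = b.toNat := by omega
        simp [hnb]
  · simp [hia]

theorem reach_Q (arr : List (List Int)) (number n : Int) (c d : Int × Int)
    (hc : pvQ arr number n c) (h : pvReach arr number n c d) : pvQ arr number n d := by
  induction h with
  | refl => exact hc
  | tail _ hstep ih => exact hstep.1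

theorem near_iff_dirs (x y : Int) (t : Int × Int) :
    pvNear (x, y) t ↔ ∃ d ∈ pvDirs, t = (x + d.1, y + d.2) := by
  simp [pvNear, pvDirs, sub_eq_add_neg]

-- B's guard for a window cell, read through the representation invariant
theorem guard_iff (arr : List (List Int)) (number n : Int) (g : List (List Int))
    (M : (Int × Int) → Prop) (hrep : pvRep arr number n g M) (c : Int × Int)
    (hw : pvWin n c) :
    pvGt (pvGet2 g c.1 c.2) number = true ↔ (pvQ arr number n c ∧ ¬ M c) := by
  by_cases hm : M c
  · simp only [hrep.1 c hm, pvGt]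
    simp [hm]
  · rw [hrep.2 c hw hm]
    simp [pvQ, hw, hm]

theorem pvGt_true_iff (o : Option Int) (number : Int) :
    pvGt o number = true ↔ ∃ v, o = some v ∧ number < v := by
  cases o <;> simp [pvGt]

theorem pvExceed_set_lt (number : Int) (g : List (List Int)) (i j v : Int)
    (h : pvGet2 g i j = some v) (hv : number < v) (hi : 0 ≤ i) (hj : 0 ≤ j) :
    pvExceed number (pvSet2 g i j number) < pvExceed number g := by
  unfold pvGet2 at h
  rw [PySem.List.pyGet?_of_nonneg g hi] at h
  obtain ⟨row, hrow, hv'⟩ := Option.bind_eq_some_iff.mp h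
  rw [PySem.List.pyGet?_of_nonneg row hj] at hv'
  have hilt : i.toNat < g.length := by
    by_contra hc
    rw [List.getElem?_eq_none (by omega)] at hrow
    simp at hrow
  have hjlt : j.toNat < row.length := by
    by_contra hc
    rw [List.getElem?_eq_none (by omega)] at hv'
    simp at hv'
  have hrow' : g[i.toNat] = row := by
    have := List.getElem?_eq_getElem hilt
    rw [this] at hrow; exact (Option.some_inj.mp hrow)
  have hv'' : row[j.toNat] = v := by
    have := List.getElem?_eq_getElem hjlt
    rw [this] at hv'; exact (Option.some_inj.mp hv')
  unfold pvSet2 pvExceed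
  rw [List.modify_eq_take_cons_drop hilt]
  conv_rhs => rw [show g = g.take i.toNat ++ g[i.toNat] :: g.drop (i.toNat + 1) by
    rw [← List.drop_eq_getElem_cons hilt, List.take_append_drop]]
  simp only [List.map_append, List.map_cons, List.sum_append, List.sum_cons]
  have hcnt : (g[i.toNat].set j.toNat number).countP (fun w => decide (number < w)) <
      g[i.toNat].countP (fun w => decide (number < w)) := by
    rw [hrow']
    rw [List.set_eq_take_append_cons_drop]
    simp only [hjlt, if_true]
    conv_rhs => rw [show row = row.take j.toNat ++ row[j.toNat] :: row.drop (j.toNat + 1) by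
      rw [← List.drop_eq_getElem_cons hjlt, List.take_append_drop]]
    simp only [List.countP_append, List.countP_cons, hv'']
    simp [hv]
  omega

theorem bfsStep_measure (number n x y : Int) (st : List (List Int) × List (Int × Int)) (d : Int × Int) :
    2 * pvExceed number (bfsStep number n x y st d).1 + (bfsStep number n x y st d).2.length ≤
      2 * pvExceed number st.1 + st.2.length := by
  unfold bfsStep
  split_ifs with h
  · obtain ⟨h1, h2, h3, h4, h5⟩ := h
    obtain ⟨v, hv, hlt⟩ := (pvGt_true_iff _ _).mp h5
    have := pvExceed_set_lt number st.1 (x + d.1) (y + d.2) v hv hlt h1 h3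
    simp only [List.length_append, List.length_cons, List.length_nil]
    omega
  · exact le_refl _

theorem bfsFold_measure (number n x y : Int) (ds : List (Int × Int)) :
    ∀ (st : List (List Int) × List (Int × Int)),
      2 * pvExceed number (ds.foldl (bfsStep number n x y) st).1 +
          (ds.foldl (bfsStep number n x y) st).2.length ≤
        2 * pvExceed number st.1 + st.2.length := by
  induction ds with
  | nil => intro st; simp
  | cons d ds ih =>
      intro st
      calc 2 * pvExceed number ((d :: ds).foldl (bfsStep number n x y) st).1 +
              ((d :: ds).foldl (bfsStep number n x y) st).2.length
          = 2 * pvExceed number (ds.foldl (bfsStep number n x y) (bfsStep number n x y st d)).1 +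
              (ds.foldl (bfsStep number n x y) (bfsStep number n x y st d)).2.length := by simp
        _ ≤ 2 * pvExceed number (bfsStep number n x y st d).1 +
              (bfsStep number n x y st d).2.length := ih _
        _ ≤ 2 * pvExceed number st.1 + st.2.length := bfsStep_measure number n x y st d

-- ---- A's inner for-loop over the four directions ----
theorem bfsFold_spec (arr : List (List Int)) (number n x y : Int) :
    ∀ (ds : List (Int × Int)), (∀ d ∈ ds, pvNear (x, y) (x + d.1, y + d.2)) →
    ∀ (g : List (List Int)) (acc : List (Int × Int)) (M : (Int × Int) → Prop),
      pvRep arr number n g M → (∀ c, M c → pvQ arr number n c) →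
      ∃ M',
        pvRep arr number n (ds.foldl (bfsStep number n x y) (g, acc)).1 M' ∧
        (∀ c, M c → M' c) ∧
        (∀ c, M' c → pvQ arr number n c) ∧
        (∀ c, M' c → M c ∨ c ∈ (ds.foldl (bfsStep number n x y) (g, acc)).2) ∧
        (∀ t ∈ (ds.foldl (bfsStep number n x y) (g, acc)).2,
          t ∈ acc ∨ (M' t ∧ pvStep arr number n (x, y) t)) ∧
        (∀ t ∈ acc, t ∈ (ds.foldl (bfsStep number n x y) (g, acc)).2) ∧
        (∀ d ∈ ds, pvStep arr number n (x, y) (x + d.1, y + d.2) → M' (x + d.1, y + d.2)) := by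
  intro ds
  induction ds with
  | nil =>
      intro _ g acc M hrep hMQ
      exact ⟨M, hrep, fun c hc => hc, hMQ, fun c hc => Or.inl hc,
        fun t ht => Or.inl ht, fun t ht => ht, fun d hd => absurd hd (List.not_mem_nil)⟩
  | cons d ds ih =>
      intro hds g acc M hrep hMQ
      simp only [List.foldl_cons]
      by_cases hgd : 0 ≤ x + d.1 ∧ x + d.1 < n ∧ 0 ≤ y + d.2 ∧ y + d.2 < n ∧
          pvGt (pvGet2 g (x + d.1) (y + d.2)) number = true
      · -- the neighbour qualifies and is unmarked: mark it and push it
        have hstep1 : bfsStep number n x y (g, acc) d =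
            (pvSet2 g (x + d.1) (y + d.2) number, acc ++ [(x + d.1, y + d.2)]) := by
          simp [bfsStep, hgd]
        have hwin : pvWin n (x + d.1, y + d.2) := ⟨hgd.1, hgd.2.1, hgd.2.2.1, hgd.2.2.2.1⟩
        have hqm := (guard_iff arr number n g M hrep (x + d.1, y + d.2) hwin).mp hgd.2.2.2.2
        obtain ⟨v, hv, _⟩ := (pvGt_true_iff _ _).mp hgd.2.2.2.2
        have hrep1 : pvRep arr number n (pvSet2 g (x + d.1) (y + d.2) number)
            (fun c => M c ∨ c = (x + d.1, y + d.2)) := by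
          constructor
          · rintro c (hc | rfl)
            · have hcw := (hMQ c hc).1
              have hcne : (c.1, c.2) ≠ (x + d.1, y + d.2) := by
                intro he
                apply hqm.2
                have : c = (x + d.1, y + d.2) := by
                  rcases c with ⟨c1, c2⟩; exact he
                exact this ▸ hc
              rw [show c = (c.1, c.2) from rfl] at hc ⊢
              rw [pvGet2_pvSet2_ne g (x + d.1) (y + d.2) number c.1 c.2 hgd.1 hgd.2.2.1
                hcw.1 hcw.2.2.1 hcne]
              exact hrep.1 _ hc
            · exact pvGet2_pvSet2_self g (x + d.1) (y + d.2) number v hv hgd.1 hgd.2.2.1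
          · intro c hcw hc
            push_neg at hc
            have hcne : (c.1, c.2) ≠ (x + d.1, y + d.2) := by
              intro he
              exact hc.2 (by rcases c with ⟨c1, c2⟩; exact he)
            rw [show c = (c.1, c.2) from rfl]
            rw [pvGet2_pvSet2_ne g (x + d.1) (y + d.2) number c.1 c.2 hgd.1 hgd.2.2.1
              hcw.1 hcw.2.2.1 hcne]
            exact hrep.2 c hcw hc.1
        have hMQ1 : ∀ c, (M c ∨ c = (x + d.1, y + d.2)) → pvQ arr number n c := by
          rintro c (hc | rfl)
          · exact hMQ c hc
          · exact hqm.1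
        obtain ⟨M', h1, h2, h3, h4, h5, h6, h7⟩ :=
          ih (fun d' hd' => hds d' (List.mem_cons_of_mem _ hd')) _ _ _ hrep1 hMQ1
        rw [hstep1]
        have hstepQ : pvStep arr number n (x, y) (x + d.1, y + d.2) :=
          ⟨hqm.1, hds d List.mem_cons_self⟩
        refine ⟨M', h1, fun c hc => h2 c (Or.inl hc), h3, ?_, ?_, ?_, ?_⟩
        · intro c hc
          rcases h4 c hc with (hc' | rfl) | hmem
          · exact Or.inl hc'
          · exact Or.inr (h6 _ (List.mem_append_right _ (List.mem_singleton_self _)))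
          · exact Or.inr hmem
        · intro t ht
          rcases h5 t ht with hta | htm
          · rcases List.mem_append.mp hta with h | h
            · exact Or.inl h
            · rcases List.mem_singleton.mp h with rfl
              exact Or.inr ⟨h2 _ (Or.inr rfl), hstepQ⟩
          · exact Or.inr htm
        · intro t ht
          exact h6 t (List.mem_append_left _ ht)
        · intro d' hd' hst
          rcases List.mem_cons.mp hd' with rfl | hd2
          · exact h2 _ (Or.inr rfl)
          · exact h7 d' hd2 hst
      · -- nothing happens in this direction
        have hstep1 : bfsStep number n x y (g, acc) d = (g, acc) := by
          simp [bfsStep, hgd]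
        obtain ⟨M', h1, h2, h3, h4, h5, h6, h7⟩ :=
          ih (fun d' hd' => hds d' (List.mem_cons_of_mem _ hd')) g acc M hrep hMQ
        rw [hstep1]
        refine ⟨M', h1, h2, h3, h4, h5, h6, ?_⟩
        intro d' hd' hst
        rcases List.mem_cons.mp hd' with rfl | hd2
        · -- the guard was false but the neighbour qualifies: it must already be marked
          have hwin := hst.1.1
          have hgt : ¬ pvGt (pvGet2 g (x + d'.1) (y + d'.2)) number = true := by
            intro hc
            exact hgd ⟨hwin.1, hwin.2.1, hwin.2.2.1, hwin.2.2.2, hc⟩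
          have := (guard_iff arr number n g M hrep (x + d'.1, y + d'.2)
            ⟨hwin.1, hwin.2.1, hwin.2.2.1, hwin.2.2.2⟩)
          have hm : M (x + d'.1, y + d'.2) := by
            by_contra hnm
            exact hgt (this.mpr ⟨hst.1, hnm⟩)
          exact h2 _ hm
        · exact h7 d' hd2 hst

-- ---- A's while-loop ----
theorem bfsLoop_spec (arr : List (List Int)) (number n : Int) (c₀ : Int × Int) :
    ∀ (fuel : Nat) (g : List (List Int)) (que : List (Int × Int)) (M : (Int × Int) → Prop),
      2 * pvExceed number g + que.length ≤ fuel →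
      pvRep arr number n g M → (∀ c, M c → pvQ arr number n c) →
      (∀ t ∈ que, M t ∧ pvReach arr number n c₀ t) →
      (∀ c, M c → c ∉ que → ∀ d, pvStep arr number n c d → M d) →
      ∃ M', pvRep arr number n (bfsLoop number n fuel g que) M' ∧ (∀ c, M c → M' c) ∧
            (∀ c, M' c → pvQ arr number n c) ∧
            (∀ c, M' c → M c ∨ pvReach arr number n c₀ c) ∧
            (∀ c, M' c → ∀ d, pvStep arr number n c d → M' d) := by
  intro fuel
  induction fuel with
  | zero =>
      intro g que M hfuel hrep hMQ hq hcl
      match que, hfuel with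
      | [], _ =>
        exact ⟨M, hrep, fun c hc => hc, hMQ, fun c hc => Or.inl hc,
          fun c hc d hst => hcl c hc (List.not_mem_nil) d hst⟩
      | (x, y) :: rest, hfuel =>
        exact absurd hfuel (by simp)
  | succ fuel ih =>
      intro g que M hfuel hrep hMQ hq hcl
      match que with
      | [] =>
        exact ⟨M, hrep, fun c hc => hc, hMQ, fun c hc => Or.inl hc,
          fun c hc d hst => hcl c hc (List.not_mem_nil) d hst⟩
      | (x, y) :: rest => ?_
      have hds : ∀ d ∈ pvDirs, pvNear (x, y) (x + d.1, y + d.2) := by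
        intro d hd
        rw [near_iff_dirs]
        exact ⟨d, hd, rfl⟩
      obtain ⟨Mf, h1, h2, h3, h4, h5, h6, h7⟩ :=
        bfsFold_spec arr number n x y pvDirs hds g [] M hrep hMQ
      have hxy := hq (x, y) List.mem_cons_self
      have hq2 : ∀ t ∈ rest ++ (pvDirs.foldl (bfsStep number n x y) (g, ([] : List (Int × Int)))).2,
          Mf t ∧ pvReach arr number n c₀ t := by
        -- queue invariant for the recursive call
        intro t ht
        rcases List.mem_append.mp ht with h | h
        · have := hq t (List.mem_cons_of_mem _ h)
          exact ⟨h2 t this.1, this.2⟩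
        · rcases h5 t h with habs | ⟨hm, hst⟩
          · cases habs
          · exact ⟨hm, Relation.ReflTransGen.tail hxy.2 hst⟩
      have hcl2 : ∀ c, Mf c → c ∉ rest ++ (pvDirs.foldl (bfsStep number n x y) (g, ([] : List (Int × Int)))).2 →
          ∀ d, pvStep arr number n c d → Mf d := by
        -- closedness invariant for the recursive call
        intro c hc hcq d hst
        rcases h4 c hc with hm | hmem
        · by_cases hcxy : c = (x, y)
          · subst hcxy
            rcases (near_iff_dirs x y d).mp hst.2 with ⟨dd, hdd, rfl⟩
            exact h7 dd hdd hst
          · have hcnot : c ∉ (x, y) :: rest := by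
              intro hmem'
              rcases List.mem_cons.mp hmem' with h | h
              · exact hcxy h
              · exact hcq (List.mem_append_left _ h)
            exact h2 d (hcl c hm hcnot d hst)
        · exact absurd (List.mem_append_right _ hmem) hcq
      have hfuel2 : 2 * pvExceed number (pvDirs.foldl (bfsStep number n x y) (g, ([] : List (Int × Int)))).1 +
          (rest ++ (pvDirs.foldl (bfsStep number n x y) (g, ([] : List (Int × Int)))).2).length ≤ fuel := by
        have hm := bfsFold_measure number n x y pvDirs (g, ([] : List (Int × Int)))
        simp only [List.length_append, List.length_cons, List.length_nil] at *
        omega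
      obtain ⟨M', g1, g2, g3, g4, g5⟩ := ih _ _ Mf hfuel2 h1 h3 hq2 hcl2
      rw [bfsLoop]
      refine ⟨M', g1, fun c hc => g2 c (h2 c hc), g3, ?_, g5⟩
      intro c hc
      rcases g4 c hc with hf | hr
      · rcases h4 c hf with hm | hmem
        · exact Or.inl hm
        · rcases h5 c hmem with habs | ⟨_, hst⟩
          · cases habs
          · exact Or.inr (Relation.ReflTransGen.tail hxy.2 hst)
      · exact Or.inr hr

-- any step-closed set containing the start contains everything reachable from it
theorem reach_mem_of_closed (arr : List (List Int)) (number n : Int) (c₀ : Int × Int)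
    (S : (Int × Int) → Prop) (h0 : S c₀) (hcl : ∀ c, S c → ∀ d, pvStep arr number n c d → S d) :
    ∀ c, pvReach arr number n c₀ c → S c := by
  intro c h
  induction h with
  | refl => exact h0
  | tail _ hstep ih => exact hcl _ ih _ hstep

-- ---- one outer-loop cell: A's bfs marks exactly the new component ----
theorem bfs_component (arr : List (List Int)) (number n : Int) (g : List (List Int))
    (M : (Int × Int) → Prop) (i j : Int)
    (hrep : pvRep arr number n g M) (hMQ : ∀ c, M c → pvQ arr number n c)
    (hcl : ∀ c, M c → ∀ d, pvStep arr number n c d → M d)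
    (hq : pvQ arr number n (i, j)) (hnm : ¬ M (i, j)) :
    ∃ M', pvRep arr number n (bfs g number n i j) M' ∧
      (∀ c, M' c ↔ M c ∨ pvReach arr number n (i, j) c) := by
  have hwin := hq.1
  obtain ⟨v, hv, _⟩ := (pvGt_true_iff _ _).mp hq.2
  have hgv : pvGet2 g i j = some v := by
    rw [hrep.2 (i, j) hwin hnm]; exact hv
  have hrep1 : pvRep arr number n (pvSet2 g i j number) (fun c => M c ∨ c = (i, j)) := by
    constructor
    · rintro c (hc | rfl)
      · have hcw := (hMQ c hc).1
        have hcne : (c.1, c.2) ≠ (i, j) := by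
          intro he
          exact hnm (by rcases c with ⟨c1, c2⟩; exact he ▸ hc)
        rw [show c = (c.1, c.2) from rfl] at hc ⊢
        rw [pvGet2_pvSet2_ne g i j number c.1 c.2 hwin.1 hwin.2.2.1 hcw.1 hcw.2.2.1 hcne]
        exact hrep.1 _ hc
      · exact pvGet2_pvSet2_self g i j number v hgv hwin.1 hwin.2.2.1
    · intro c hcw hc
      push_neg at hc
      have hcne : (c.1, c.2) ≠ (i, j) := by
        intro he
        exact hc.2 (by rcases c with ⟨c1, c2⟩; exact he)
      rw [show c = (c.1, c.2) from rfl]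
      rw [pvGet2_pvSet2_ne g i j number c.1 c.2 hwin.1 hwin.2.2.1 hcw.1 hcw.2.2.1 hcne]
      exact hrep.2 c hcw hc.1
  obtain ⟨M', h1, h2, h3, h4, h5⟩ := bfsLoop_spec arr number n (i, j)
    (2 * pvExceed number (pvSet2 g i j number) + 1)
    (pvSet2 g i j number) [(i, j)] (fun c => M c ∨ c = (i, j)) (by simp) hrep1
    (by rintro c (hc | rfl); exacts [hMQ c hc, hq])
    (by rintro t ht; rcases List.mem_singleton.mp ht with rfl
        exact ⟨Or.inr rfl, Relation.ReflTransGen.refl⟩)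
    (by rintro c (hc | rfl) hcq d hst
        · exact Or.inl (hcl c hc d hst)
        · exact absurd (List.mem_singleton_self _) hcq)
  refine ⟨M', h1, fun c => ⟨?_, ?_⟩⟩
  · intro hc
    rcases h4 c hc with (hm | rfl) | hr
    · exact Or.inl hm
    · exact Or.inr Relation.ReflTransGen.refl
    · exact Or.inr hr
  · rintro (hm | hr)
    · exact h2 c (Or.inl hm)
    · exact reach_mem_of_closed arr number n (i, j) M' (h2 _ (Or.inr rfl)) h5 c hr
-- ---- generic helpers: scan order, nested folds, closures, small Dict facts ----
def pvScan (n : Int) : List (Int × Int) :=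
  (PySem.List.pyRange 0 n 1).flatMap (fun i => (PySem.List.pyRange 0 n 1).map (fun j => (i, j)))

theorem mem_pvScan (n : Int) (c : Int × Int) : c ∈ pvScan n ↔ pvWin n c := by
  rcases c with ⟨x, y⟩
  unfold pvScan pvWin
  constructor
  · intro h
    obtain ⟨i, hi, hmap⟩ := List.mem_flatMap.mp h
    obtain ⟨j, hj, he⟩ := List.mem_map.mp hmap
    obtain ⟨hi1, hi2⟩ := PySem.List.mem_pyRange_one.mp hi
    obtain ⟨hj1, hj2⟩ := PySem.List.mem_pyRange_one.mp hj
    cases he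
    exact ⟨hi1, hi2, hj1, hj2⟩
  · rintro ⟨h1, h2, h3, h4⟩
    exact List.mem_flatMap.mpr ⟨x, PySem.List.mem_pyRange_one.mpr ⟨h1, h2⟩,
      List.mem_map.mpr ⟨y, PySem.List.mem_pyRange_one.mpr ⟨h3, h4⟩, rfl⟩⟩

theorem foldl_nest {σ : Type} (R : List Int) (f : σ → (Int × Int) → σ) :
    ∀ (L : List Int) (init : σ),
      L.foldl (fun st i => R.foldl (fun st j => f st (i, j)) st) init
        = (L.flatMap (fun i => R.map (fun j => (i, j)))).foldl f init := by
  intro L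
  induction L with
  | nil => intro init; rfl
  | cons a L ih =>
      intro init
      simp only [List.foldl_cons, List.flatMap_cons, List.foldl_append, List.foldl_map]
      exact ih _

theorem rtg_congr {α : Type} (r s : α → α → Prop) (h : ∀ x y, r x y ↔ s x y) (x y : α) :
    Relation.ReflTransGen r x y ↔ Relation.ReflTransGen s x y :=
  ⟨Relation.ReflTransGen.mono (fun a b => (h a b).mp),
   Relation.ReflTransGen.mono (fun a b => (h a b).mpr)⟩

-- closure of a relation with one (undirected) edge u–v added
theorem rtg_add_edge {α : Type} (r : α → α → Prop) (u v x y : α) :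
    Relation.ReflTransGen (fun a b => r a b ∨ (a = u ∧ b = v) ∨ (a = v ∧ b = u)) x y ↔
      Relation.ReflTransGen r x y ∨
      (Relation.ReflTransGen r x u ∧ Relation.ReflTransGen r v y) ∨
      (Relation.ReflTransGen r x v ∧ Relation.ReflTransGen r u y) := by
  constructor
  · intro h
    induction h with
    | refl => exact Or.inl Relation.ReflTransGen.refl
    | tail hxb hstep ih =>
        rcases hstep with hr | ⟨rfl, rfl⟩ | ⟨rfl, rfl⟩
        · rcases ih with h1 | ⟨h1, h2⟩ | ⟨h1, h2⟩
          · exact Or.inl (h1.tail hr)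
          · exact Or.inr (Or.inl ⟨h1, h2.tail hr⟩)
          · exact Or.inr (Or.inr ⟨h1, h2.tail hr⟩)
        · rcases ih with h1 | ⟨h1, h2⟩ | ⟨h1, h2⟩
          · exact Or.inr (Or.inl ⟨h1, Relation.ReflTransGen.refl⟩)
          · exact Or.inr (Or.inl ⟨h1, Relation.ReflTransGen.refl⟩)
          · exact Or.inl h1
        · rcases ih with h1 | ⟨h1, h2⟩ | ⟨h1, h2⟩
          · exact Or.inr (Or.inr ⟨h1, Relation.ReflTransGen.refl⟩)
          · exact Or.inl h1
          · exact Or.inr (Or.inr ⟨h1, Relation.ReflTransGen.refl⟩)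
  · rintro (h1 | ⟨h1, h2⟩ | ⟨h1, h2⟩)
    · exact h1.mono (fun a b hr => Or.inl hr)
    · exact Relation.ReflTransGen.trans
        (@Relation.ReflTransGen.tail _ (fun a b => r a b ∨ (a = u ∧ b = v) ∨ (a = v ∧ b = u))
          x u v (h1.mono (fun a b hr => Or.inl hr)) (Or.inr (Or.inl ⟨rfl, rfl⟩)))
        (h2.mono (fun a b hr => Or.inl hr))
    · exact Relation.ReflTransGen.trans
        (@Relation.ReflTransGen.tail _ (fun a b => r a b ∨ (a = u ∧ b = v) ∨ (a = v ∧ b = u))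
          x v u (h1.mono (fun a b hr => Or.inl hr)) (Or.inr (Or.inr ⟨rfl, rfl⟩)))
        (h2.mono (fun a b hr => Or.inl hr))

-- adding an edge between two already-connected points changes nothing
theorem rtg_add_edge_of_rel {α : Type} (r : α → α → Prop) (hsym : Symmetric r) (u v x y : α)
    (huv : Relation.ReflTransGen r u v) :
    Relation.ReflTransGen (fun a b => r a b ∨ (a = u ∧ b = v) ∨ (a = v ∧ b = u)) x y ↔
      Relation.ReflTransGen r x y := by
  rw [rtg_add_edge]
  constructor
  · rintro (h | ⟨h1, h2⟩ | ⟨h1, h2⟩)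
    · exact h
    · exact (h1.trans huv).trans h2
    · exact (h1.trans ((Relation.ReflTransGen.symmetric hsym) huv)).trans h2
  · exact Or.inl

theorem pv_find?_filter_ne {ν : Type} (k k' : Int × Int) (h : k' ≠ k) :
    ∀ (l : List ((Int × Int) × ν)),
      (l.filter (fun p => !(p.1 == k))).find? (fun p => p.1 == k') = l.find? (fun p => p.1 == k') := by
  intro l
  induction l with
  | nil => rfl
  | cons p rest ih =>
      by_cases hp : p.1 = k
      · have h1 : (p.1 == k) = true := by simp [hp]
        have h2 : (p.1 == k') = false := by
          simp only [beq_eq_false_iff_ne, ne_eq, hp]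
          exact fun he => h he.symm
        simp only [List.filter_cons, h1, Bool.not_true, if_false, List.find?_cons, h2]
        exact ih
      · have h1 : (p.1 == k) = false := by simp [hp]
        by_cases hp' : p.1 = k'
        · have h2 : (p.1 == k') = true := by simp [hp']
          simp [List.filter_cons, h1, List.find?_cons, h2]
        · have h2 : (p.1 == k') = false := by simp [hp']
          simp only [List.filter_cons, h1, Bool.not_false, if_true, List.find?_cons, h2]
          exact ih

theorem pv_getD_erase_of_ne {ν : Type} (d : PySem.Dict (Int × Int) ν) (k k' : Int × Int) (d0 : ν)
    (h : k' ≠ k) : (d.erase k).getD k' d0 = d.getD k' d0 := by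
  show ((List.filter _ d.items).find? _ |>.map _).getD d0 = _
  rw [pv_find?_filter_ne k k' h d.items]
  rfl

theorem pv_getD_erase_self {ν : Type} (d : PySem.Dict (Int × Int) ν) (k : Int × Int) (d0 : ν) :
    (d.erase k).getD k d0 = d0 := by
  show ((List.filter _ d.items).find? (fun p => p.1 == k) |>.map _).getD d0 = _
  have : (List.filter (fun p => !(p.1 == k)) d.items).find? (fun p => p.1 == k) = none := by
    rw [List.find?_eq_none]
    intro p hp
    have := (List.mem_filter.mp hp).2
    simpa using this
  rw [this]
  rfl

-- a loop writing the same value v at each key of l, read back pointwise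
theorem pv_getD_foldl_insert_const (v : Int × Int) :
    ∀ (l : List (Int × Int)) (D : PySem.Dict (Int × Int) (Int × Int)) (x : Int × Int) (d0 : Int × Int),
      (l.foldl (fun L d => L.insert d v) D).getD x d0 = if x ∈ l then v else D.getD x d0 := by
  intro l
  induction l with
  | nil => intro D x d0; simp
  | cons a l ih =>
      intro D x d0
      simp only [List.foldl_cons]
      rw [ih]
      by_cases hx : x ∈ l
      · simp [hx]
      · by_cases hxa : x = a
        · subst hxa
          simp [hx, PySem.Dict.getD_insert_self]
        · simp only [hx, if_false, List.mem_cons, hxa, false_or]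
          rw [PySem.Dict.getD_insert_of_ne D v d0 hxa]

theorem pv_keys_foldl_insert_of_mem (v : Int × Int) :
    ∀ (l : List (Int × Int)) (D : PySem.Dict (Int × Int) (Int × Int)), (∀ x ∈ l, x ∈ D.keys) →
      (l.foldl (fun L d => L.insert d v) D).keys = D.keys := by
  intro l
  induction l with
  | nil => intro D _; rfl
  | cons a l ih =>
      intro D hmem
      simp only [List.foldl_cons]
      have hk : (D.insert a v).keys = D.keys :=
        PySem.Dict.keys_insert_of_contains D v
          ((PySem.Dict.contains_iff_mem_keys D a).mpr (hmem a List.mem_cons_self))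
      rw [ih (D.insert a v) (fun x hx => hk ▸ hmem x (List.mem_cons_of_mem _ hx)), hk]

-- the default of getD is irrelevant at a present key
theorem pv_getD_irrel {ν : Type} (d : PySem.Dict (Int × Int) ν) (k : Int × Int) (d0 d1 : ν)
    (h : k ∈ d.keys) : d.getD k d0 = d.getD k d1 := by
  have hc : d.contains k = true := (PySem.Dict.contains_iff_mem_keys d k).mpr h
  have h2 := PySem.Dict.contains_eq_isSome_get? (d := d) (k := k)
  rw [hc] at h2
  obtain ⟨v, hv⟩ := Option.isSome_iff_exists.mp h2.symm
  rw [PySem.Dict.getD_eq_get?_getD, PySem.Dict.getD_eq_get?_getD, hv]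
  rfl

-- ---- B's first pass: the label dict maps each qualifying cell to itself ----
def pvGtb (arr : List (List Int)) (number : Int) (c : Int × Int) : Bool :=
  pvGt (pvGet2 arr c.1 c.2) number

def pvKL (arr : List (List Int)) (number n : Int) : List (Int × Int) :=
  (pvScan n).filter (pvGtb arr number)

theorem pvBuild_eq (arr : List (List Int)) (number n : Int) :
    pvBuild arr number n = (pvKL arr number n).foldl (fun d c => d.insert c c) PySem.Dict.empty := by
  unfold pvBuild pvKL pvScan
  rw [List.foldl_filter]
  exact foldl_nest (PySem.List.pyRange 0 n 1)
    (fun d (c : Int × Int) => if pvGtb arr number c = true then d.insert c c else d)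
    (PySem.List.pyRange 0 n 1) PySem.Dict.empty

def pvK0 (arr : List (List Int)) (number n : Int) : List (Int × Int) := (pvBuild arr number n).keys

theorem pvK0_eq (arr : List (List Int)) (number n : Int) :
    pvK0 arr number n = PySem.Set.ofList (pvKL arr number n) := by
  unfold pvK0
  rw [pvBuild_eq, PySem.Dict.keys_foldl_insert]
  rw [PySem.Set.ofList_eq_foldl]
  rfl

theorem mem_pvK0 (arr : List (List Int)) (number n : Int) (c : Int × Int) :
    c ∈ pvK0 arr number n ↔ pvQ arr number n c := by
  rw [pvK0_eq, PySem.Set.mem_ofList]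
  unfold pvKL
  rw [List.mem_filter, mem_pvScan]
  unfold pvQ pvGtb
  rfl

theorem nodup_pvK0 (arr : List (List Int)) (number n : Int) : (pvK0 arr number n).Nodup := by
  unfold pvK0
  rw [pvBuild_eq]
  exact PySem.Dict.nodup_keys_foldl_insert _ _ _ (by simp)

theorem pvBuild_getD_self (arr : List (List Int)) (number n : Int) :
    ∀ x, (pvBuild arr number n).getD x x = x := by
  rw [pvBuild_eq]
  generalize pvKL arr number n = l
  have main : ∀ (l : List (Int × Int)) (D : PySem.Dict (Int × Int) (Int × Int)),
      (∀ x, D.getD x x = x) → ∀ x, (l.foldl (fun d c => d.insert c c) D).getD x x = x := by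
    intro l
    induction l with
    | nil => intro D h x; exact h x
    | cons a l ih =>
        intro D h x
        simp only [List.foldl_cons]
        refine ih _ ?_ x
        intro y
        by_cases hy : y = a
        · subst hy; rw [PySem.Dict.getD_insert_self]
        · rw [PySem.Dict.getD_insert_of_ne _ _ _ hy]; exact h y
  exact main l PySem.Dict.empty (by simp)

theorem pvMembers0_getD (lab : PySem.Dict (Int × Int) (Int × Int)) (hnd : lab.keys.Nodup)
    (l : Int × Int) :
    (pvMembers0 lab).getD l [] = if l ∈ lab.keys then [l] else [] := by
  unfold pvMembers0
  have hitems := PySem.Dict.items_foldl_insert_fresh lab.keys (fun c => c) (fun c => [c])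
    PySem.Dict.empty (by intro a _; simp) (by simpa using hnd)
  have hnd' : (lab.keys.foldl (fun m c => m.insert c [c]) PySem.Dict.empty).keys.Nodup :=
    PySem.Dict.nodup_keys_foldl_insert _ _ _ (by simp)
  have hk : (lab.keys.foldl (fun m c => m.insert c [c]) PySem.Dict.empty).keys = lab.keys := by
    show (lab.keys.foldl (fun m c => m.insert c [c]) PySem.Dict.empty).items.map (·.1) = lab.keys
    rw [hitems]
    simp [PySem.Dict.empty, List.map_map, Function.comp_def]
  by_cases hl : l ∈ lab.keys
  · rw [if_pos hl]
    have hm : (l, [l]) ∈ (lab.keys.foldl (fun m c => m.insert c [c]) PySem.Dict.empty).items := by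
      rw [hitems]
      simp only [List.nil_append]
      exact List.mem_map_of_mem hl
    exact PySem.Dict.getD_of_mem_items _ hm hnd' []
  · rw [if_neg hl]
    refine PySem.Dict.getD_of_not_contains _ [] ?_
    rw [PySem.Dict.contains_eq_decide_mem_keys, hk]
    simp [hl]

-- ---- the union pass: processed right/down edges between qualifying cells ----
def pvEdge (K pre : List (Int × Int)) (x y : Int × Int) : Prop :=
  ∃ c t : Int × Int, c ∈ K ∧ t ∈ K ∧ c ∈ pre ∧ (t = (c.1, c.2 + 1) ∨ t = (c.1 + 1, c.2)) ∧
    ((x = c ∧ y = t) ∨ (x = t ∧ y = c))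

theorem pvEdge_symm (K pre : List (Int × Int)) : Symmetric (pvEdge K pre) := by
  rintro x y ⟨c, t, h1, h2, h3, h4, h5⟩
  exact ⟨c, t, h1, h2, h3, h4, by tauto⟩

-- the invariant of the union pass: keys are fixed, members lists the label preimages,
-- and two qualifying cells carry the same label iff they are joined by processed edges
def pvInvB (K : List (Int × Int)) (E : (Int × Int) → (Int × Int) → Prop)
    (st : PySem.Dict (Int × Int) (Int × Int) × PySem.Dict (Int × Int) (List (Int × Int))) : Prop :=
  st.1.keys = K ∧
  (∀ l x, x ∈ st.2.getD l [] ↔ (x ∈ K ∧ st.1.getD x x = l)) ∧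
  (∀ a b, a ∈ K → b ∈ K → (st.1.getD a a = st.1.getD b b ↔ Relation.ReflTransGen E a b))

theorem pvInvB_congr (K : List (Int × Int)) (E E' : (Int × Int) → (Int × Int) → Prop)
    (h : ∀ x y, E x y ↔ E' x y) (st : PySem.Dict (Int × Int) (Int × Int) × PySem.Dict (Int × Int) (List (Int × Int))) :
    pvInvB K E st → pvInvB K E' st := by
  rintro ⟨h1, h2, h3⟩
  exact ⟨h1, h2, fun a b ha hb => (h3 a b ha hb).trans (rtg_congr _ _ h a b)⟩

theorem pv_if_merge_iff (u v keep drop : Int × Int) (hne : keep ≠ drop) :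
    ((if u = drop then keep else u) = (if v = drop then keep else v)) ↔
      (u = v ∨ (u = keep ∧ v = drop) ∨ (u = drop ∧ v = keep)) := by
  by_cases hu : u = drop <;> by_cases hv : v = drop <;> simp [hu, hv, hne] <;> tauto

-- the (keep, drop) pair chosen by the size comparison (proof-side name for the inlined swap)
def pvP (st : PySem.Dict (Int × Int) (Int × Int) × PySem.Dict (Int × Int) (List (Int × Int)))
    (c0 t : Int × Int) : (Int × Int) × (Int × Int) :=
  if (st.2.getD (st.1.getD c0 c0) []).length < (st.2.getD (st.1.getD t t) []).length then
    (st.1.getD t t, st.1.getD c0 c0)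
  else (st.1.getD c0 c0, st.1.getD t t)

theorem pvMerge_inv (K : List (Int × Int)) (E : (Int × Int) → (Int × Int) → Prop)
    (hsym : Symmetric E)
    (st : PySem.Dict (Int × Int) (Int × Int) × PySem.Dict (Int × Int) (List (Int × Int)))
    (hinv : pvInvB K E st) (c0 t : Int × Int) (hc0 : c0 ∈ K) :
    pvInvB K (fun x y => E x y ∨ (t ∈ K ∧ ((x = c0 ∧ y = t) ∨ (x = t ∧ y = c0)))) (pvMerge st c0 t) := by
  obtain ⟨hkeys, hmem, hchar⟩ := hinv
  by_cases hct : st.1.contains t = true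
  · have ht : t ∈ K := hkeys ▸ (PySem.Dict.contains_iff_mem_keys _ _).mp hct
    have hE' : ∀ x y, (E x y ∨ (t ∈ K ∧ ((x = c0 ∧ y = t) ∨ (x = t ∧ y = c0)))) ↔
        (E x y ∨ (x = c0 ∧ y = t) ∨ (x = t ∧ y = c0)) := by
      intro x y; simp [ht]
    by_cases hab : st.1.getD c0 c0 = st.1.getD t t
    · have hmerge : pvMerge st c0 t = st := by
        unfold pvMerge
        rw [if_pos hct]
        show (if ¬ st.1.getD c0 c0 = st.1.getD t t then _ else st) = st
        rw [if_neg (by exact fun h => h hab)]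
      rw [hmerge]
      refine ⟨hkeys, hmem, ?_⟩
      intro a b ha hb
      rw [hchar a b ha hb, ← rtg_add_edge_of_rel E hsym c0 t a b ((hchar c0 t hc0 ht).mp hab)]
      exact (rtg_congr _ _ (fun x y => (hE' x y).symm) a b)
    · -- a ≠ b: relabel the smaller class and merge the member lists
      have hmerge : pvMerge st c0 t =
          ((st.2.getD (pvP st c0 t).2 []).foldl (fun L d => L.insert d (pvP st c0 t).1) st.1,
           (st.2.modify (pvP st c0 t).1 [] (fun L => L ++ st.2.getD (pvP st c0 t).2 [])).erase (pvP st c0 t).2) := by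
        unfold pvMerge
        rw [if_pos hct]
        show (if ¬ st.1.getD c0 c0 = st.1.getD t t then
            ((st.2.getD (pvP st c0 t).2 []).foldl (fun L d => L.insert d (pvP st c0 t).1) st.1,
             (st.2.modify (pvP st c0 t).1 [] (fun L => L ++ st.2.getD (pvP st c0 t).2 [])).erase (pvP st c0 t).2)
          else st) = _
        rw [if_pos hab]
      set a := st.1.getD c0 c0 with ha_def
      set b := st.1.getD t t with hb_def
      set P := pvP st c0 t with hP_def
      have hkd : (P.1 = a ∧ P.2 = b) ∨ (P.1 = b ∧ P.2 = a) := by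
        rw [hP_def]
        unfold pvP
        rw [← ha_def, ← hb_def]
        split_ifs <;> simp
      have hne : P.1 ≠ P.2 := by
        rcases hkd with ⟨h1, h2⟩ | ⟨h1, h2⟩ <;> rw [h1, h2]
        · exact hab
        · exact fun h => hab h.symm
      rw [hmerge]
      set lab' := (st.2.getD P.2 []).foldl (fun L d => L.insert d P.1) st.1 with hlab'_def
      have hlabx : ∀ x d0, lab'.getD x d0 = if x ∈ st.2.getD P.2 [] then P.1 else st.1.getD x d0 :=
        fun x d0 => pv_getD_foldl_insert_const _ _ _ _ _
      have hF : ∀ x, x ∈ K → lab'.getD x x = (if st.1.getD x x = P.2 then P.1 else st.1.getD x x) := by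
        intro x hx
        rw [hlabx]
        by_cases hxl : st.1.getD x x = P.2
        · rw [if_pos ((hmem P.2 x).mpr ⟨hx, hxl⟩), if_pos hxl]
        · rw [if_neg (fun hc => hxl ((hmem P.2 x).mp hc).2), if_neg hxl]
      have hFnot : ∀ x, x ∉ K → lab'.getD x x = st.1.getD x x := by
        intro x hx
        rw [hlabx, if_neg (fun hc => hx ((hmem P.2 x).mp hc).1)]
      refine ⟨?_, ?_, ?_⟩
      · -- keys unchanged
        show lab'.keys = K
        rw [hlab'_def, pv_keys_foldl_insert_of_mem _ _ _ (fun x hx => by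
          rw [hkeys]; exact ((hmem P.2 x).mp hx).1)]
        exact hkeys
      · -- members lists the label preimages
        intro l x
        show x ∈ ((st.2.modify P.1 [] (fun L => L ++ st.2.getD P.2 [])).erase P.2).getD l [] ↔ _
        by_cases hxK : x ∈ K
        · rw [hF x hxK]
          by_cases hl2 : l = P.2
          · subst hl2
            rw [pv_getD_erase_self]
            simp only [List.not_mem_nil, false_iff, not_and]
            intro _
            by_cases hx2 : st.1.getD x x = P.2
            · rw [if_pos hx2]; exact hne
            · rw [if_neg hx2]; exact hx2
          · rw [pv_getD_erase_of_ne _ _ _ _ hl2, PySem.Dict.getD_modify]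
            by_cases hl1 : l = P.1
            · rw [if_pos hl1, List.mem_append]
              subst hl1
              rw [hmem P.1 x, hmem P.2 x]
              constructor
              · rintro (⟨hx, h⟩ | ⟨hx, h⟩)
                · exact ⟨hx, by rw [if_neg (fun he => hne (h.symm.trans he)), h]⟩
                · exact ⟨hx, by rw [if_pos h]⟩
              · rintro ⟨hx, h⟩
                by_cases hx2 : st.1.getD x x = P.2
                · exact Or.inr ⟨hx, hx2⟩
                · rw [if_neg hx2] at h
                  exact Or.inl ⟨hx, h⟩
            · rw [if_neg hl1, hmem l x]
              constructor
              · rintro ⟨hx, h⟩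
                refine ⟨hx, ?_⟩
                rw [if_neg (fun he => hl2 (h.symm.trans he)), h]
              · rintro ⟨hx, h⟩
                by_cases hx2 : st.1.getD x x = P.2
                · rw [if_pos hx2] at h
                  exact absurd h.symm hl1
                · rw [if_neg hx2] at h
                  exact ⟨hx, h⟩
        · -- x outside the key set appears in no members list
          constructor
          · intro hx
            by_cases hl2 : l = P.2
            · subst hl2; rw [pv_getD_erase_self] at hx; cases hx
            · rw [pv_getD_erase_of_ne _ _ _ _ hl2, PySem.Dict.getD_modify] at hx
              by_cases hl1 : l = P.1
              · rw [if_pos hl1] at hx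
                rcases List.mem_append.mp hx with h | h
                · exact absurd ((hmem P.1 x).mp h).1 hxK
                · exact absurd ((hmem P.2 x).mp h).1 hxK
              · rw [if_neg hl1] at hx
                exact absurd ((hmem l x).mp hx).1 hxK
          · rintro ⟨hx, _⟩
            exact absurd hx hxK
      · -- the label characterisation with the new edge
        intro x y hx hy
        show lab'.getD x x = lab'.getD y y ↔ _
        rw [hF x hx, hF y hy, pv_if_merge_iff _ _ _ _ hne]
        rw [rtg_congr _ _ hE' x y, rtg_add_edge]
        rw [← hchar x y hx hy, ← hchar x c0 hx hc0, ← hchar t y ht hy,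
            ← hchar x t hx ht, ← hchar c0 y hc0 hy]
        rw [← ha_def, ← hb_def]
        constructor
        · rintro (h | ⟨h1, h2⟩ | ⟨h1, h2⟩)
          · exact Or.inl h
          · rcases hkd with ⟨hk1, hk2⟩ | ⟨hk1, hk2⟩
            · exact Or.inr (Or.inl ⟨hk1 ▸ h1, (hk2 ▸ h2).symm⟩)
            · exact Or.inr (Or.inr ⟨hk1 ▸ h1, (hk2 ▸ h2).symm⟩)
          · rcases hkd with ⟨hk1, hk2⟩ | ⟨hk1, hk2⟩
            · exact Or.inr (Or.inr ⟨hk2 ▸ h1, (hk1 ▸ h2).symm⟩)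
            · exact Or.inr (Or.inl ⟨hk2 ▸ h1, (hk1 ▸ h2).symm⟩)
        · rintro (h | ⟨h1, h2⟩ | ⟨h1, h2⟩)
          · exact Or.inl h
          · rcases hkd with ⟨hk1, hk2⟩ | ⟨hk1, hk2⟩
            · exact Or.inr (Or.inl ⟨hk1.symm ▸ h1, (hk2.symm ▸ h2.symm : _)⟩)
            · exact Or.inr (Or.inr ⟨hk2.symm ▸ h1, (hk1.symm ▸ h2.symm : _)⟩)
          · rcases hkd with ⟨hk1, hk2⟩ | ⟨hk1, hk2⟩
            · exact Or.inr (Or.inr ⟨hk2.symm ▸ h1, (hk1.symm ▸ h2.symm : _)⟩)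
            · exact Or.inr (Or.inl ⟨hk1.symm ▸ h1, (hk2.symm ▸ h2.symm : _)⟩)
  · -- t is not a key: nothing happens and no edge is added
    have ht : t ∉ K := fun h => hct (by rw [PySem.Dict.contains_iff_mem_keys, hkeys]; exact h)
    have hmerge : pvMerge st c0 t = st := by
      unfold pvMerge
      rw [if_neg hct]
    rw [hmerge]
    refine ⟨hkeys, hmem, ?_⟩
    intro a b ha hb
    rw [hchar a b ha hb]
    exact rtg_congr _ _ (fun x y => by simp [ht]) a b

-- ---- the per-cell step of B's union pass, and the pass invariant ----
def pvBStep (st : PySem.Dict (Int × Int) (Int × Int) × PySem.Dict (Int × Int) (List (Int × Int)))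
    (c : Int × Int) :
    PySem.Dict (Int × Int) (Int × Int) × PySem.Dict (Int × Int) (List (Int × Int)) :=
  if st.1.contains c then
    [(c.1, c.2 + 1), (c.1 + 1, c.2)].foldl (fun st' t => pvMerge st' c t) st
  else st

theorem pvEdge_append_not_mem (K pre : List (Int × Int)) (c0 : Int × Int) (hc0 : c0 ∉ K)
    (x y : Int × Int) : pvEdge K (pre ++ [c0]) x y ↔ pvEdge K pre x y := by
  constructor
  · rintro ⟨c, t, h1, h2, h3, h4, h5⟩
    rcases List.mem_append.mp h3 with h3 | h3
    · exact ⟨c, t, h1, h2, h3, h4, h5⟩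
    · rcases List.mem_singleton.mp h3 with rfl
      exact absurd h1 hc0
  · rintro ⟨c, t, h1, h2, h3, h4, h5⟩
    exact ⟨c, t, h1, h2, List.mem_append_left _ h3, h4, h5⟩

theorem pvEdge_append_iff (K pre : List (Int × Int)) (c0 : Int × Int) (hc0 : c0 ∈ K)
    (x y : Int × Int) :
    pvEdge K (pre ++ [c0]) x y ↔
      ((pvEdge K pre x y ∨ ((c0.1, c0.2 + 1) ∈ K ∧ ((x = c0 ∧ y = (c0.1, c0.2 + 1)) ∨ (x = (c0.1, c0.2 + 1) ∧ y = c0)))) ∨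
       ((c0.1 + 1, c0.2) ∈ K ∧ ((x = c0 ∧ y = (c0.1 + 1, c0.2)) ∨ (x = (c0.1 + 1, c0.2) ∧ y = c0)))) := by
  constructor
  · rintro ⟨c, t, h1, h2, h3, h4, h5⟩
    rcases List.mem_append.mp h3 with h3 | h3
    · exact Or.inl (Or.inl ⟨c, t, h1, h2, h3, h4, h5⟩)
    · rcases List.mem_singleton.mp h3 with rfl
      rcases h4 with rfl | rfl
      · exact Or.inl (Or.inr ⟨h2, h5⟩)
      · exact Or.inr ⟨h2, h5⟩
  · rintro ((he | ⟨ht, h⟩) | ⟨ht, h⟩)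
    · obtain ⟨c, t, h1, h2, h3, h4, h5⟩ := he
      exact ⟨c, t, h1, h2, List.mem_append_left _ h3, h4, h5⟩
    · exact ⟨c0, (c0.1, c0.2 + 1), hc0, ht, List.mem_append_right _ (List.mem_singleton_self _),
        Or.inl rfl, h⟩
    · exact ⟨c0, (c0.1 + 1, c0.2), hc0, ht, List.mem_append_right _ (List.mem_singleton_self _),
        Or.inr rfl, h⟩

theorem pvBStep_inv (K pre : List (Int × Int))
    (st : PySem.Dict (Int × Int) (Int × Int) × PySem.Dict (Int × Int) (List (Int × Int)))
    (c0 : Int × Int) (hinv : pvInvB K (pvEdge K pre) st) :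
    pvInvB K (pvEdge K (pre ++ [c0])) (pvBStep st c0) := by
  by_cases hc0 : c0 ∈ K
  · have hcont : st.1.contains c0 = true := by
      rw [PySem.Dict.contains_iff_mem_keys, hinv.1]; exact hc0
    have hstep : pvBStep st c0 = pvMerge (pvMerge st c0 (c0.1, c0.2 + 1)) c0 (c0.1 + 1, c0.2) := by
      unfold pvBStep
      rw [if_pos hcont]
      rfl
    rw [hstep]
    have h1 := pvMerge_inv K (pvEdge K pre) (pvEdge_symm K pre) st hinv c0 (c0.1, c0.2 + 1) hc0
    have hsym1 : Symmetric (fun x y => pvEdge K pre x y ∨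
        ((c0.1, c0.2 + 1) ∈ K ∧ ((x = c0 ∧ y = (c0.1, c0.2 + 1)) ∨ (x = (c0.1, c0.2 + 1) ∧ y = c0)))) := by
      rintro x y (h | ⟨ht, h⟩)
      · exact Or.inl (pvEdge_symm K pre h)
      · exact Or.inr ⟨ht, by tauto⟩
    have h2 := pvMerge_inv K _ hsym1 _ h1 c0 (c0.1 + 1, c0.2) hc0
    exact pvInvB_congr K _ _ (fun x y => (pvEdge_append_iff K pre c0 hc0 x y).symm) _ h2
  · have hcont : st.1.contains c0 = false := by
      rw [PySem.Dict.contains_eq_decide_mem_keys, hinv.1]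
      simp [hc0]
    have hstep : pvBStep st c0 = st := by
      unfold pvBStep
      rw [if_neg (by simp [hcont])]
    rw [hstep]
    exact pvInvB_congr K _ _ (fun x y => (pvEdge_append_not_mem K pre c0 hc0 x y).symm) _ hinv

theorem pvInvB_init (arr : List (List Int)) (number n : Int) :
    pvInvB (pvK0 arr number n) (pvEdge (pvK0 arr number n) [])
      (pvBuild arr number n, pvMembers0 (pvBuild arr number n)) := by
  refine ⟨rfl, ?_, ?_⟩
  · intro l x
    show x ∈ (pvMembers0 (pvBuild arr number n)).getD l [] ↔ _
    rw [pvMembers0_getD _ (nodup_pvK0 arr number n) l]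
    by_cases hl : l ∈ (pvBuild arr number n).keys
    · rw [if_pos hl]
      simp only [List.mem_singleton]
      constructor
      · rintro rfl
        exact ⟨hl, pvBuild_getD_self arr number n x⟩
      · rintro ⟨hx, h⟩
        rw [pvBuild_getD_self arr number n x] at h
        exact h
    · rw [if_neg hl]
      simp only [List.not_mem_nil, false_iff, not_and]
      intro hx
      rw [pvBuild_getD_self arr number n x]
      exact fun he => hl (he ▸ hx)
  · intro a b ha hb
    show (pvBuild arr number n).getD a a = (pvBuild arr number n).getD b b ↔ _
    rw [pvBuild_getD_self, pvBuild_getD_self]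
    have hno : ∀ z, ¬ pvEdge (pvK0 arr number n) [] a z := by
      rintro z ⟨c, t, _, _, hc, _, _⟩
      exact absurd hc (List.not_mem_nil)
    rw [Relation.reflTransGen_iff_eq hno]
    exact ⟨fun h => h.symm, fun h => h.symm⟩

theorem pvB_run (K : List (Int × Int)) :
    ∀ (l pre : List (Int × Int))
      (st : PySem.Dict (Int × Int) (Int × Int) × PySem.Dict (Int × Int) (List (Int × Int))),
      pvInvB K (pvEdge K pre) st →
      pvInvB K (pvEdge K (pre ++ l)) (l.foldl pvBStep st) := by
  intro l
  induction l with
  | nil =>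
      intro pre st h
      simpa using h
  | cons c l ih =>
      intro pre st h
      have h1 := pvBStep_inv K pre st c h
      have h2 := ih (pre ++ [c]) _ h1
      rw [List.append_assoc] at h2
      simpa using h2

-- ---- B's final labelling function and its characterisation ----
def pvUnion (arr : List (List Int)) (number n : Int) :
    PySem.Dict (Int × Int) (Int × Int) × PySem.Dict (Int × Int) (List (Int × Int)) :=
  (pvScan n).foldl pvBStep (pvBuild arr number n, pvMembers0 (pvBuild arr number n))

def pvF (arr : List (List Int)) (number n : Int) (c : Int × Int) : Int × Int :=
  (pvUnion arr number n).1.getD c c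

theorem pvUnion_inv (arr : List (List Int)) (number n : Int) :
    pvInvB (pvK0 arr number n) (pvEdge (pvK0 arr number n) (pvScan n)) (pvUnion arr number n) := by
  have h := pvB_run (pvK0 arr number n) (pvScan n) []
    (pvBuild arr number n, pvMembers0 (pvBuild arr number n)) (pvInvB_init arr number n)
  simpa using h

theorem pvEdge_sub_step (arr : List (List Int)) (number n : Int) (x y : Int × Int)
    (h : pvEdge (pvK0 arr number n) (pvScan n) x y) : pvStep arr number n x y := by
  obtain ⟨c, t, hc, ht, _, hshape, hor⟩ := h
  have hQc := (mem_pvK0 arr number n c).mp hc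
  have hQt := (mem_pvK0 arr number n t).mp ht
  rcases hor with ⟨rfl, rfl⟩ | ⟨rfl, rfl⟩
  · refine ⟨hQt, ?_⟩
    rcases hshape with rfl | rfl
    · exact Or.inr (Or.inl rfl)
    · exact Or.inr (Or.inr (Or.inl rfl))
  · refine ⟨hQc, ?_⟩
    rcases hshape with rfl | rfl
    · exact Or.inl (Prod.ext_iff.mpr ⟨by simp, by simp⟩)
    · exact Or.inr (Or.inr (Or.inr (Prod.ext_iff.mpr ⟨by simp, by simp⟩)))

theorem step_to_edge (arr : List (List Int)) (number n : Int) (x y : Int × Int)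
    (hQx : pvQ arr number n x) (hst : pvStep arr number n x y) :
    pvEdge (pvK0 arr number n) (pvScan n) x y := by
  have hQy := hst.1
  have hx : x ∈ pvK0 arr number n := (mem_pvK0 arr number n x).mpr hQx
  have hy : y ∈ pvK0 arr number n := (mem_pvK0 arr number n y).mpr hQy
  have hxs : x ∈ pvScan n := (mem_pvScan n x).mpr hQx.1
  have hys : y ∈ pvScan n := (mem_pvScan n y).mpr hQy.1
  rcases hst.2 with h | h | h | h
  · refine ⟨y, x, hy, hx, hys, Or.inl ?_, Or.inr ⟨rfl, rfl⟩⟩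
    rcases x with ⟨x1, x2⟩; rcases y with ⟨y1, y2⟩
    simp only [Prod.mk.injEq] at h ⊢
    omega
  · exact ⟨x, y, hx, hy, hxs, Or.inl h, Or.inl ⟨rfl, rfl⟩⟩
  · exact ⟨x, y, hx, hy, hxs, Or.inr h, Or.inl ⟨rfl, rfl⟩⟩
  · refine ⟨y, x, hy, hx, hys, Or.inr ?_, Or.inr ⟨rfl, rfl⟩⟩
    rcases x with ⟨x1, x2⟩; rcases y with ⟨y1, y2⟩
    simp only [Prod.mk.injEq] at h ⊢
    omega

theorem rtg_edge_iff_reach (arr : List (List Int)) (number n : Int) (a b : Int × Int)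
    (hQa : pvQ arr number n a) :
    Relation.ReflTransGen (pvEdge (pvK0 arr number n) (pvScan n)) a b ↔ pvReach arr number n a b := by
  constructor
  · exact Relation.ReflTransGen.mono (fun x y h => pvEdge_sub_step arr number n x y h)
  · intro h
    induction h with
    | refl => exact Relation.ReflTransGen.refl
    | tail hab hstep ih =>
        exact ih.tail (step_to_edge arr number n _ _ (reach_Q arr number n a _ hQa hab) hstep)

theorem pvF_char (arr : List (List Int)) (number n : Int) (a b : Int × Int)
    (hQa : pvQ arr number n a) (hQb : pvQ arr number n b) :
    pvF arr number n a = pvF arr number n b ↔ pvReach arr number n a b := by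
  obtain ⟨hkeys, hmem, hchar⟩ := pvUnion_inv arr number n
  unfold pvF
  rw [hchar a b ((mem_pvK0 arr number n a).mpr hQa) ((mem_pvK0 arr number n b).mpr hQb)]
  exact rtg_edge_iff_reach arr number n a b hQa

theorem execut_alt_eq (arr : List (List Int)) (number n : Int) :
    execut_alt arr number n = ((PySem.Set.ofList (pvUnion arr number n).1.values).length : Int) := by
  show ((PySem.Set.ofList ((((PySem.List.pyRange 0 n 1).foldl
      (fun st i => (PySem.List.pyRange 0 n 1).foldl (fun st j => pvBStep st (i, j)) st)
      (pvBuild arr number n, pvMembers0 (pvBuild arr number n))).1).values)).length : Int) = _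
  rw [foldl_nest (PySem.List.pyRange 0 n 1) pvBStep (PySem.List.pyRange 0 n 1)
      (pvBuild arr number n, pvMembers0 (pvBuild arr number n))]
  rfl

-- ---- A's outer double loop over the same scan order ----
def pvAStep (number n : Int) (st : List (List Int) × Int) (c : Int × Int) :
    List (List Int) × Int :=
  if pvGt (pvGet2 st.1 c.1 c.2) number = true then (bfs st.1 number n c.1 c.2, st.2 + 1) else st

theorem execut_eq_flat (arr : List (List Int)) (number n : Int) :
    execut arr number n = ((pvScan n).foldl (pvAStep number n) (arr, (0 : Int))).2 := by
  show (((PySem.List.pyRange 0 n 1).foldl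
      (fun st i => (PySem.List.pyRange 0 n 1).foldl (fun st j => pvAStep number n st (i, j)) st)
      (arr, (0 : Int))).2) = _
  rw [foldl_nest (PySem.List.pyRange 0 n 1) (pvAStep number n) (PySem.List.pyRange 0 n 1)
      (arr, (0 : Int))]
  rfl

-- cells already flooded after processing a scan prefix: those reachable from an earlier qualifying cell
def pvMR (arr : List (List Int)) (number n : Int) (pre : List (Int × Int)) (c : Int × Int) : Prop :=
  ∃ s ∈ pre, pvQ arr number n s ∧ pvReach arr number n s c

theorem pvMR_sub_Q (arr : List (List Int)) (number n : Int) (pre : List (Int × Int)) (c : Int × Int)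
    (h : pvMR arr number n pre c) : pvQ arr number n c := by
  obtain ⟨s, _, hQ, hr⟩ := h
  exact reach_Q arr number n s c hQ hr

theorem pvMR_closed (arr : List (List Int)) (number n : Int) (pre : List (Int × Int))
    (c d : Int × Int) (h : pvMR arr number n pre c) (hst : pvStep arr number n c d) :
    pvMR arr number n pre d := by
  obtain ⟨s, hs, hQ, hr⟩ := h
  exact ⟨s, hs, hQ, hr.tail hst⟩

theorem pvMR_append (arr : List (List Int)) (number n : Int) (pre : List (Int × Int))
    (c0 d : Int × Int) :
    pvMR arr number n (pre ++ [c0]) d ↔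
      pvMR arr number n pre d ∨ (pvQ arr number n c0 ∧ pvReach arr number n c0 d) := by
  constructor
  · rintro ⟨s, hs, h1, h2⟩
    rcases List.mem_append.mp hs with h | h
    · exact Or.inl ⟨s, h, h1, h2⟩
    · rcases List.mem_singleton.mp h with rfl
      exact Or.inr ⟨h1, h2⟩
  · rintro (⟨s, hs, h1, h2⟩ | ⟨h1, h2⟩)
    · exact ⟨s, List.mem_append_left _ hs, h1, h2⟩
    · exact ⟨c0, List.mem_append_right _ (List.mem_singleton_self _), h1, h2⟩

theorem pvA_run (arr : List (List Int)) (number n : Int) :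
    ∀ (l pre : List (Int × Int)), (∀ c ∈ l, pvWin n c) → (∀ c ∈ pre, pvWin n c) →
    ∀ (g : List (List Int)) (cnt : Int),
      pvRep arr number n g (pvMR arr number n pre) →
      cnt = (((pre.filter (pvGtb arr number)).map (pvF arr number n)).toFinset.card : Int) →
      (l.foldl (pvAStep number n) (g, cnt)).2 =
        ((((pre ++ l).filter (pvGtb arr number)).map (pvF arr number n)).toFinset.card : Int) := by
  intro l
  induction l with
  | nil =>
      intro pre _ _ g cnt hrep hcnt
      simpa using hcnt
  | cons c l ih =>
      intro pre hwl hwpre g cnt hrep hcnt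
      have hwc : pvWin n c := hwl c List.mem_cons_self
      have hgu := guard_iff arr number n g (pvMR arr number n pre) hrep c hwc
      simp only [List.foldl_cons]
      have hres : pre ++ c :: l = (pre ++ [c]) ++ l := by simp
      rw [hres]
      have hwpre2 : ∀ d ∈ pre ++ [c], pvWin n d := by
        intro d hd
        rcases List.mem_append.mp hd with h | h
        · exact hwpre d h
        · rcases List.mem_singleton.mp h with rfl
          exact hwc
      have hwl2 : ∀ d ∈ l, pvWin n d := fun d hd => hwl d (List.mem_cons_of_mem _ hd)
      by_cases hg : pvGt (pvGet2 g c.1 c.2) number = true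
      · obtain ⟨hQc, hnm⟩ := hgu.mp hg
        have hstep : pvAStep number n (g, cnt) c = (bfs g number n c.1 c.2, cnt + 1) := by
          simp [pvAStep, hg]
        rw [hstep]
        obtain ⟨M', hrep', hiff⟩ := bfs_component arr number n g (pvMR arr number n pre) c.1 c.2
          hrep (fun d hd => pvMR_sub_Q arr number n pre d hd)
          (fun d hd e hst => pvMR_closed arr number n pre d e hd hst) hQc hnm
        have hrep2 : pvRep arr number n (bfs g number n c.1 c.2) (pvMR arr number n (pre ++ [c])) := by
          refine pvRep_congr arr number n _ M' _ (fun d => ?_) hrep'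
          rw [hiff d, pvMR_append arr number n pre c d]
          constructor
          · rintro (h | h)
            · exact Or.inl h
            · exact Or.inr ⟨hQc, h⟩
          · rintro (h | h)
            · exact Or.inl h
            · exact Or.inr h.2
        have hgtb : pvGtb arr number c = true := hQc.2
        have hnot : pvF arr number n c ∉ ((pre.filter (pvGtb arr number)).map (pvF arr number n)).toFinset := by
          intro hmem'
          rw [List.mem_toFinset, List.mem_map] at hmem'
          obtain ⟨s, hs, he⟩ := hmem'
          rw [List.mem_filter] at hs
          have hQs : pvQ arr number n s := ⟨hwpre s hs.1, hs.2⟩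
          exact hnm ⟨s, hs.1, hQs, (pvF_char arr number n s c hQs hQc).mp he⟩
        have hcnt2 : cnt + 1 =
            ((((pre ++ [c]).filter (pvGtb arr number)).map (pvF arr number n)).toFinset.card : Int) := by
          rw [List.filter_append, show [c].filter (pvGtb arr number) = [c] by
                simp [List.filter_singleton, hgtb],
              List.map_append, List.toFinset_append,
              show ((List.map (pvF arr number n) [c]).toFinset : Finset (Int × Int))
                  = {pvF arr number n c} by simp,
              Finset.union_comm, ← Finset.insert_eq,
              Finset.card_insert_of_notMem hnot, hcnt]
          push_cast
          ring
        exact ih (pre ++ [c]) hwl2 hwpre2 (bfs g number n c.1 c.2) (cnt + 1) hrep2 hcnt2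
      · have hstep : pvAStep number n (g, cnt) c = (g, cnt) := by
          simp [pvAStep, hg]
        rw [hstep]
        by_cases hQc : pvQ arr number n c
        · have hmr : pvMR arr number n pre c := by
            by_contra hnm
            exact hg (hgu.mpr ⟨hQc, hnm⟩)
          have habs : ∀ d, pvMR arr number n (pre ++ [c]) d ↔ pvMR arr number n pre d := by
            intro d
            rw [pvMR_append]
            constructor
            · rintro (h | ⟨_, h2⟩)
              · exact h
              · obtain ⟨s, hs, h3, h4⟩ := hmr
                exact ⟨s, hs, h3, h4.trans h2⟩
            · exact Or.inl
          have hrep2 : pvRep arr number n g (pvMR arr number n (pre ++ [c])) :=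
            pvRep_congr arr number n g _ _ (fun d => (habs d).symm) hrep
          have hFc : pvF arr number n c ∈
              ((pre.filter (pvGtb arr number)).map (pvF arr number n)).toFinset := by
            obtain ⟨s, hs, hQs, hr⟩ := hmr
            rw [List.mem_toFinset, List.mem_map]
            exact ⟨s, List.mem_filter.mpr ⟨hs, hQs.2⟩, (pvF_char arr number n s c hQs hQc).mpr hr⟩
          have hcnt2 : cnt =
              ((((pre ++ [c]).filter (pvGtb arr number)).map (pvF arr number n)).toFinset.card : Int) := by
            rw [List.filter_append, show [c].filter (pvGtb arr number) = [c] by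
                  simp [List.filter_singleton, pvGtb, hQc.2],
                List.map_append, List.toFinset_append,
                show ((List.map (pvF arr number n) [c]).toFinset : Finset (Int × Int))
                    = {pvF arr number n c} by simp,
                Finset.union_comm, ← Finset.insert_eq, Finset.insert_eq_of_mem hFc]
            exact hcnt
          exact ih (pre ++ [c]) hwl2 hwpre2 g cnt hrep2 hcnt2
        · have hgtb : pvGtb arr number c = false := by
            rw [Bool.eq_false_iff]
            intro hb
            exact hQc ⟨hwc, hb⟩
          have habs : ∀ d, pvMR arr number n (pre ++ [c]) d ↔ pvMR arr number n pre d := by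
            intro d
            rw [pvMR_append]
            constructor
            · rintro (h | ⟨h1, _⟩)
              · exact h
              · exact absurd h1 hQc
            · exact Or.inl
          have hrep2 : pvRep arr number n g (pvMR arr number n (pre ++ [c])) :=
            pvRep_congr arr number n g _ _ (fun d => (habs d).symm) hrep
          have hcnt2 : cnt =
              ((((pre ++ [c]).filter (pvGtb arr number)).map (pvF arr number n)).toFinset.card : Int) := by
            rw [List.filter_append, show [c].filter (pvGtb arr number) = [] by
                  simp [List.filter_singleton, hgtb],
                List.append_nil]
            exact hcnt
          exact ih (pre ++ [c]) hwl2 hwpre2 g cnt hrep2 hcnt2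

theorem execut_eq_alt (arr : List (List Int)) (number n : Int) :
    execut arr number n = execut_alt arr number n := by
  rw [execut_eq_flat, execut_alt_eq]
  have hrep0 : pvRep arr number n arr (pvMR arr number n []) := by
    constructor
    · rintro c ⟨s, hs, _⟩
      exact absurd hs (List.not_mem_nil)
    · intro c _ _
      rfl
  have hA := pvA_run arr number n (pvScan n) [] (fun c hc => (mem_pvScan n c).mp hc)
    (fun c hc => absurd hc (List.not_mem_nil)) arr 0 hrep0 (by simp)
  simp only [List.nil_append] at hA
  rw [hA]
  obtain ⟨hkeys, hmem, hchar⟩ := pvUnion_inv arr number n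
  have hnd : (pvUnion arr number n).1.keys.Nodup := by
    rw [hkeys]; exact nodup_pvK0 arr number n
  have hvals : (pvUnion arr number n).1.values = (pvK0 arr number n).map (pvF arr number n) := by
    rw [PySem.Dict.values_eq_map_keys _ hnd ((0 : Int), (0 : Int)), hkeys]
    refine List.map_congr_left ?_
    intro k hk
    unfold pvF
    exact pv_getD_irrel _ _ _ _ (hkeys ▸ hk)
  rw [hvals]
  have hlen : ∀ (l : List (Int × Int)), (PySem.Set.ofList l).length = l.toFinset.card := by
    intro l
    have h1 : (PySem.Set.ofList l).toFinset = l.toFinset := by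
      apply Finset.ext
      intro x
      simp [List.mem_toFinset, PySem.Set.mem_ofList]
    rw [← h1, List.toFinset_card_of_nodup (PySem.Set.nodup_ofList l)]
  rw [hlen]
  have hfs : ((pvK0 arr number n).map (pvF arr number n)).toFinset
      = (((pvScan n).filter (pvGtb arr number)).map (pvF arr number n)).toFinset := by
    apply Finset.ext
    intro x
    simp only [List.mem_toFinset, List.mem_map]
    constructor
    · rintro ⟨a, ha, rfl⟩
      rw [pvK0_eq, PySem.Set.mem_ofList] at ha
      exact ⟨a, ha, rfl⟩
    · rintro ⟨a, ha, rfl⟩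
      refine ⟨a, ?_, rfl⟩
      rw [pvK0_eq, PySem.Set.mem_ofList]
      exact ha
  rw [hfs]

-- ===== VERDICT (by name: the statement is the Claim_ definition above) =====
theorem execut_spec : Claim_equal_execut := by
  intro arr number n _ _
  unfold Spec_execut
  exact execut_eq_alt arr number n
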